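-- pv_equiv track=rewrite | github.com/David-Li0406/SMoA | utils.py | extract_role_from_output
-- ===== SOURCE A (Python) =====
-- def extract_role_from_output(output):
--     roles = []
--     new_role = ""
--     for line in output.strip().split('\n'):
--         if "Generated Role Description" in line:
--             if new_role != "":
--                 roles.append(new_role.strip())
--             new_role = ""
--             continue
--         new_role += line
--     roles.append(new_role.strip())
--
--     return roles
-- ===== SOURCE B (Python) =====
-- def extract_role_from_output(output):
--     # Delimiter parsing with an index cursor: repeatedly search for the next
--     # marker line, join the slice before it into a chunk (a role if non-empty);
--     # the remainder after the last marker is the final role.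
--     lines = output.strip().split('\n')
--     roles = []
--     start = 0
--     while True:
--         stop = next((k for k in range(start, len(lines))
--                      if "Generated Role Description" in lines[k]), None)
--         if stop is None:
--             roles.append(''.join(lines[start:]).strip())
--             return roles
--         chunk = ''.join(lines[start:stop])
--         if chunk:
--             roles.append(chunk.strip())
--         start = stop + 1
-- ===== Notes on version B (the rewrite author's own statement) =====
-- stated objective: alternative
-- what changed: Replaces A's per-line accumulate-and-flush loop (a pending role buffer extended line by line and flushed at each marker) by delimiter parsing with an index cursor: repeatedly search for the next marker line, join the slice before it into a chunk (a role if non-empty), and return early with the joined remainder after the last marker as the final role.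
import Mathlib
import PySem

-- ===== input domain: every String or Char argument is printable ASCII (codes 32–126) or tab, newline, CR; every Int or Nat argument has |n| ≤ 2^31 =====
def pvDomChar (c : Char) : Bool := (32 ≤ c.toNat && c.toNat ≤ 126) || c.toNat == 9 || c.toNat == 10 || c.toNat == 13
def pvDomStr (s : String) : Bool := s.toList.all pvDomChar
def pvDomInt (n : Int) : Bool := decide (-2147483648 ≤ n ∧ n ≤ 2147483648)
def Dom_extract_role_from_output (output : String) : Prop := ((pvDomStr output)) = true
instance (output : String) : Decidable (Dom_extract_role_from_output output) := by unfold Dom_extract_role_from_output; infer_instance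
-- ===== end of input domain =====

-- B replaces A's per-line accumulate-and-flush loop by delimiter parsing with an index cursor (search for the next marker line, slice and join the chunk, early return on the tail); alternative structure, same cost.


-- ===== PORT A =====
def pvMarker : List Char := "Generated Role Description".toList

-- loop body of A: state = (roles, new_role)
def pvStepA (st : List (List Char) × List Char) (line : List Char) : List (List Char) × List Char :=
  if PySem.Chars.isIn pvMarker line then
    (if !st.2.isEmpty then st.1 ++ [PySem.Chars.strip st.2] else st.1, [])
  else (st.1, st.2 ++ line)

def extract_role_from_output (output : String) : List String :=
  let st := (PySem.Chars.splitOn (PySem.Chars.strip output.toList) ['\n']).foldl pvStepA ([], [])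
  (st.1 ++ [PySem.Chars.strip st.2]).map String.ofList

-- ===== PORT B =====
-- "Generated Role Description" in lines[k]
def pvNonMark (l : List Char) : Bool := !PySem.Chars.isIn pvMarker l

-- B's while-loop with its `start` cursor, encoded on the remaining suffix
-- lines[start:]: the `next(...)` search for the first marker line at or after
-- `start` is the takeWhile/dropWhile split of the suffix at the first marker
-- (stop is None ⟺ the dropWhile part is empty); ''.join of a slice is flatten,
-- and `start = stop + 1` moves to the tail after the found marker line.
def pvParse (roles : List (List Char)) (rest : List (List Char)) : List (List Char) :=
  if hstop : (rest.dropWhile pvNonMark).isEmpty then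
    roles ++ [PySem.Chars.strip rest.flatten]
  else
    pvParse
      (if !((rest.takeWhile pvNonMark).flatten.isEmpty) then
        roles ++ [PySem.Chars.strip (rest.takeWhile pvNonMark).flatten]
      else roles)
      ((rest.dropWhile pvNonMark).tail)
termination_by rest.length
decreasing_by
  have h1 : (rest.dropWhile pvNonMark).length ≤ rest.length := rest.length_dropWhile_le pvNonMark
  have h2 : (rest.dropWhile pvNonMark).length ≠ 0 := by
    simpa [List.isEmpty_iff, List.length_eq_zero_iff] using hstop
  simp [List.length_tail]
  omega

def extract_role_from_output_alt (output : String) : List String :=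
  (pvParse [] (PySem.Chars.splitOn (PySem.Chars.strip output.toList) ['\n'])).map String.ofList

-- ===== PRECONDITION & SPEC =====
def Spec_extract_role_from_output (output : String) (out : List String) : Prop := out = extract_role_from_output_alt output
instance (output : String) (out : List String) : Decidable (Spec_extract_role_from_output output out) := by unfold Spec_extract_role_from_output; infer_instance

-- ===== CLAIM (what is proved, stated in full; the proofs are below) =====
def Claim_equal_extract_role_from_output : Prop := ∀ (output : String), Dom_extract_role_from_output output → Spec_extract_role_from_output output (extract_role_from_output output)

-- ===== LEMMAS AND PROOFS =====
-- Common description of the marker-delimited chunks of a line list, last chunk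
-- included even when empty; both ports are reduced to it.
def pvSegs : List (List Char) → List (List Char)
  | [] => [[]]
  | l :: ls =>
    let segs := pvSegs ls
    if PySem.Chars.isIn pvMarker l then [] :: segs
    else (l ++ segs.headD []) :: segs.tail
lemma pvSegs_ne (ls : List (List Char)) : pvSegs ls ≠ [] := by
  cases ls with
  | nil => simp [pvSegs]
  | cons l ls => simp only [pvSegs]; split <;> simp
lemma pvSegs_nomark (ls : List (List Char)) (h : ∀ l ∈ ls, PySem.Chars.isIn pvMarker l = false) :
    pvSegs ls = [ls.flatten] := by
  induction ls with
  | nil => rfl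
  | cons l ls ih =>
    have hl := h l (by simp)
    rw [List.flatten_cons]
    simp [pvSegs, hl, ih (fun x hx => h x (by simp [hx]))]
def pvSF (segs : List (List Char)) : List (List Char) :=
  (segs.filter (fun s => !s.isEmpty)).map PySem.Chars.strip

lemma pvSegs_split (rest : List (List Char)) (h : ¬ (rest.dropWhile pvNonMark).isEmpty = true) :
    pvSegs rest = (rest.takeWhile pvNonMark).flatten :: pvSegs ((rest.dropWhile pvNonMark).tail) := by
  induction rest with
  | nil => simp at h
  | cons l ls ih =>
    by_cases hm : PySem.Chars.isIn pvMarker l = true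
    · have hnm : pvNonMark l = false := by simp [pvNonMark, hm]
      simp [pvSegs, hm, List.dropWhile_cons, hnm]
    · have hnm : pvNonMark l = true := by simp [pvNonMark, hm]
      have h' : ¬ (ls.dropWhile pvNonMark).isEmpty = true := by
        simpa [List.dropWhile_cons, hnm] using h
      have := ih h'
      simp [pvSegs, hm, hnm, this]

lemma pvParse_eq (roles : List (List Char)) (rest : List (List Char)) :
    pvParse roles rest =
      roles ++ pvSF ((pvSegs rest).dropLast)
        ++ [PySem.Chars.strip ((pvSegs rest).getLastD [])] := by
  induction roles, rest using pvParse.induct with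
  | case1 roles rest hstop =>
    have hall : ∀ x ∈ rest, PySem.Chars.isIn pvMarker x = false := by
      intro x hx
      have := List.dropWhile_eq_nil_iff.mp (List.isEmpty_iff.mp hstop) x hx
      simpa [pvNonMark] using this
    rw [pvParse]
    simp [hstop, pvSegs_nomark rest hall, pvSF]
  | case2 roles rest hstop ih =>
    rw [pvParse, dif_neg hstop]
    simp only [dite_eq_ite] at ih
    rw [ih, pvSegs_split rest hstop]
    obtain ⟨s, ss, hss⟩ := List.exists_cons_of_ne_nil (pvSegs_ne ((rest.dropWhile pvNonMark).tail))
    rw [hss]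
    simp only [pvSF, List.dropLast_cons₂, List.filter_cons, List.getLastD_cons]
    by_cases hc : (rest.takeWhile pvNonMark).flatten.isEmpty = true <;> simp [hc]

lemma pvFoldA (lines : List (List Char)) : ∀ acc cur,
    lines.foldl pvStepA (acc, cur) =
      (acc ++ pvSF (((cur ++ (pvSegs lines).headD []) :: (pvSegs lines).tail).dropLast),
       ((cur ++ (pvSegs lines).headD []) :: (pvSegs lines).tail).getLastD []) := by
  induction lines with
  | nil => intro acc cur; simp [pvSegs, pvSF]
  | cons l ls ih =>
    intro acc cur
    have hne := pvSegs_ne ls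
    by_cases hm : PySem.Chars.isIn pvMarker l = true
    · have h1 : (l :: ls).foldl pvStepA (acc, cur) =
          ls.foldl pvStepA (acc ++ (if !cur.isEmpty then [PySem.Chars.strip cur] else []), []) := by
        simp only [List.foldl_cons, pvStepA, hm, if_true]
        by_cases hc : cur.isEmpty <;> simp [hc]
      rw [h1, ih]
      obtain ⟨s, ss, hss⟩ := List.exists_cons_of_ne_nil hne
      simp only [pvSegs, hm, if_true, hss, List.headD_cons, List.tail_cons, List.nil_append,
        List.append_nil, List.dropLast_cons₂, List.getLastD_cons, pvSF, List.filter_cons]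
      by_cases hc : cur.isEmpty = true <;> simp [hc]
    · have h1 : (l :: ls).foldl pvStepA (acc, cur) = ls.foldl pvStepA (acc, cur ++ l) := by
        simp [pvStepA, hm]
      rw [h1, ih]
      obtain ⟨s, ss, hss⟩ := List.exists_cons_of_ne_nil hne
      simp only [pvSegs, hm]
      cases ss with
      | nil => simp [hss]
      | cons t ts => simp [hss]

lemma pvA_eq (output : String) :
    extract_role_from_output output =
      (pvSF ((pvSegs (PySem.Chars.splitOn (PySem.Chars.strip output.toList) ['\n'])).dropLast)
        ++ [PySem.Chars.strip ((pvSegs (PySem.Chars.splitOn (PySem.Chars.strip output.toList) ['\n'])).getLastD [])]).map String.ofList := by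
  unfold extract_role_from_output
  rw [pvFoldA]
  obtain ⟨s, ss, hss⟩ := List.exists_cons_of_ne_nil (pvSegs_ne (PySem.Chars.splitOn (PySem.Chars.strip output.toList) ['\n']))
  simp [hss]

-- ===== VERDICT (by name: the statement is the Claim_ definition above) =====
theorem extract_role_from_output_spec : Claim_equal_extract_role_from_output := by
  intro output _
  unfold Spec_extract_role_from_output extract_role_from_output_alt
  rw [pvA_eq, pvParse_eq]
  simp
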